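-- pv_equiv track=rewrite | github.com/victoria-brauer/NewsBot | app/utils.py | find_matched_keywords
-- ===== SOURCE A (Python) =====
-- def find_matched_keywords(text: str, keywords: list[str]) -> list[str]:
--     """Вернуть список ключевых слов, которые встречаются в тексте."""
--     matched: list[str] = []
--     seen: set[str] = set()
--
--     for keyword in keywords:
--         if keyword in seen:
--             continue
--
--         if keyword in text:
--             seen.add(keyword)
--             matched.append(keyword)
--     return matched
-- ===== SOURCE B (Python) =====
-- def find_matched_keywords(text: str, keywords: list[str]) -> list[str]:
--     """Вернуть список ключевых слов, которые встречаются в тексте."""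
--     lengths = {len(k) for k in keywords}
--     substrings = {text[i:i + n] for n in lengths for i in range(len(text) - n + 1)}
--     return [k for k in dict.fromkeys(keywords) if k in substrings]
-- ===== Notes on version B (the rewrite author's own statement) =====
-- stated objective: faster
-- what changed: B builds a hash set of all substrings of text whose lengths occur among the keywords once, then emits the order-preserving dedup of the keywords filtered by O(1)-expected set membership, instead of A's per-keyword substring scan of text with a running seen-set.
import Mathlib
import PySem

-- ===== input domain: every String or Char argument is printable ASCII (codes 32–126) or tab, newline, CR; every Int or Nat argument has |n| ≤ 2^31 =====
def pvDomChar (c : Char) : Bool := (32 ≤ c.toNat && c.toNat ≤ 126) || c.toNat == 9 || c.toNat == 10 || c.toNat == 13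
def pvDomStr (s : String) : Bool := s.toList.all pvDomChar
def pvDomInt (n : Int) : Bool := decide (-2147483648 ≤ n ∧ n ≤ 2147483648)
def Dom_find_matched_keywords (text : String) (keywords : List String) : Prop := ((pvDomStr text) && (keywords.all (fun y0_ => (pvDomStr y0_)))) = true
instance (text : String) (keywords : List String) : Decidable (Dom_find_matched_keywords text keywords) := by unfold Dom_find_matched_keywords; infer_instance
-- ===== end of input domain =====

-- B indexes the text once (a set of all substrings whose lengths occur among the keywords),
-- then filters the order-preserving dedup of the keywords by set membership; alternative
-- structure to A's per-keyword substring scan with a running seen-set.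


-- ===== PORT A =====
def find_matched_keywords (text : String) (keywords : List String) : List String :=
  (keywords.foldl
    (fun (acc : List String × PySem.Set String) keyword =>
      if PySem.Set.contains acc.2 keyword then acc
      else if PySem.Str.isIn keyword text then (acc.1 ++ [keyword], PySem.Set.add acc.2 keyword)
      else acc)
    (([] : List String), (PySem.Set.empty : PySem.Set String))).1

-- ===== PORT B =====
-- {text[i:i + n] for n in lengths for i in range(len(text) - n + 1)}
def pvSubstrSet (text : String) (lengths : PySem.Set Int) : PySem.Set String :=
  lengths.foldl
    (fun s n =>
      (PySem.List.pyRange 0 (PySem.Str.len text - n + 1) 1).foldl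
        (fun s i => PySem.Set.add s (PySem.Str.slice text (some i) (some (i + n)))) s)
    PySem.Set.empty

def find_matched_keywords_alt (text : String) (keywords : List String) : List String :=
  let lengths : PySem.Set Int := PySem.Set.ofList (keywords.map PySem.Str.len)
  let substrings : PySem.Set String := pvSubstrSet text lengths
  (PySem.List.dedup keywords).foldl
    (fun out k => if PySem.Set.contains substrings k then out ++ [k] else out) []

-- ===== PRECONDITION & SPEC =====
def Spec_find_matched_keywords (text : String) (keywords : List String) (out : List String) : Prop := out = find_matched_keywords_alt text keywords
instance (text : String) (keywords : List String) (out : List String) : Decidable (Spec_find_matched_keywords text keywords out) := by unfold Spec_find_matched_keywords; infer_instance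

-- ===== CLAIM (what is proved, stated in full; the proofs are below) =====
def Claim_equal_find_matched_keywords : Prop := ∀ (text : String) (keywords : List String), Dom_find_matched_keywords text keywords → Spec_find_matched_keywords text keywords (find_matched_keywords text keywords)

-- ===== LEMMAS AND PROOFS =====

-- membership in a fold of Set.update
theorem pv_mem_foldl_update {F : Int → List String} : ∀ (l : List Int) (s : PySem.Set String) (y : String),
    (y ∈ l.foldl (fun s n => PySem.Set.update s (F n)) s) ↔ y ∈ s ∨ ∃ n ∈ l, y ∈ F n := by
  intro l
  induction l with
  | nil => simp
  | cons n l ih =>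
    intro s y
    simp [List.foldl_cons, ih, PySem.Set.mem_update]
    tauto

-- what the substring set contains
theorem pv_mem_pvSubstrSet (text : String) (L : PySem.Set Int) (y : String) :
    y ∈ pvSubstrSet text L ↔
      ∃ n ∈ L, ∃ i ∈ PySem.List.pyRange 0 (PySem.Str.len text - n + 1) 1,
        PySem.Str.slice text (some i) (some (i + n)) = y := by
  have hrw : pvSubstrSet text L
      = L.foldl (fun s n => PySem.Set.update s
          ((PySem.List.pyRange 0 (PySem.Str.len text - n + 1) 1).map
            (fun i => PySem.Str.slice text (some i) (some (i + n))))) PySem.Set.empty := by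
    unfold pvSubstrSet
    have hfun : (fun (s : PySem.Set String) (n : Int) =>
        (PySem.List.pyRange 0 (PySem.Str.len text - n + 1) 1).foldl
          (fun s i => PySem.Set.add s (PySem.Str.slice text (some i) (some (i + n)))) s)
      = (fun (s : PySem.Set String) (n : Int) => PySem.Set.update s
          ((PySem.List.pyRange 0 (PySem.Str.len text - n + 1) 1).map
            (fun i => PySem.Str.slice text (some i) (some (i + n))))) := by
      funext s n
      rw [PySem.Set.update_map_eq_foldl_add]
    rw [hfun]
  rw [hrw, pv_mem_foldl_update]
  simp [PySem.Set.empty, List.mem_map]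

-- any in-range slice of text occurs in text
theorem pv_slice_isIn (text : String) (n i : Int) (hi : 0 ≤ i) (hn : 0 ≤ n) :
    PySem.Str.isIn (PySem.Str.slice text (some i) (some (i + n))) text = true := by
  have hb : 0 ≤ i + n := by omega
  rw [PySem.Str.isIn_eq]
  apply (PySem.Chars.exists_prefix_drop_iff_isIn _ _).mp
  refine ⟨i.toNat, ?_⟩
  rw [PySem.Str.toList_slice, PySem.Chars.slice_eq_listSlice, PySem.List.slice_toNat _ hi hb]
  exact List.take_prefix _ _

-- a keyword occurs in text iff some slice of its own length equals it
theorem pv_isIn_iff_slice (text k : String) :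
    PySem.Str.isIn k text = true ↔
      ∃ i ∈ PySem.List.pyRange 0 (PySem.Str.len text - PySem.Str.len k + 1) 1,
        PySem.Str.slice text (some i) (some (i + PySem.Str.len k)) = k := by
  constructor
  · intro h
    rw [PySem.Str.isIn_eq, PySem.Chars.isIn_iff_infix] at h
    obtain ⟨pre, suf, hps⟩ := h
    refine ⟨(pre.length : Int), ?_, ?_⟩
    · rw [PySem.List.mem_pyRange_one]
      have hlen : text.toList.length = pre.length + k.toList.length + suf.length := by
        rw [← hps]; simp; omega
      constructor
      · positivity
      · rw [PySem.Str.len_eq, PySem.Str.len_eq]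
        omega
    · apply String.toList_inj.mp
      rw [PySem.Str.toList_slice, PySem.Chars.slice_eq_listSlice, PySem.Str.len_eq]
      have hcast : ((pre.length : Int) + (k.toList.length : Int)) = ((pre.length + k.toList.length : Nat) : Int) := by push_cast; ring
      rw [hcast, PySem.List.slice_natCast]
      rw [← hps]
      simp
  · rintro ⟨i, hi, hsl⟩
    rw [PySem.List.mem_pyRange_one] at hi
    have hn : (0 : Int) ≤ PySem.Str.len k := by rw [PySem.Str.len_eq]; positivity
    rw [← hsl]
    exact pv_slice_isIn text _ i hi.1 hn

-- the membership predicate B uses agrees with A's substring test on every keyword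
theorem pv_pred_eq (text : String) (keywords : List String) (k : String) (hk : k ∈ keywords) :
    PySem.Set.contains (pvSubstrSet text (PySem.Set.ofList (keywords.map PySem.Str.len))) k
      = PySem.Str.isIn k text := by
  rcases hb : PySem.Str.isIn k text with _ | _
  · rw [← hb]
    by_contra hc
    rw [hb] at hc
    have hmem : k ∈ pvSubstrSet text (PySem.Set.ofList (keywords.map PySem.Str.len)) := by
      have := PySem.Set.contains_iff (pvSubstrSet text (PySem.Set.ofList (keywords.map PySem.Str.len))) k
      rcases h2 : PySem.Set.contains (pvSubstrSet text (PySem.Set.ofList (keywords.map PySem.Str.len))) k with _|_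
      · exact absurd h2 (by simpa [h2, hb] using hc)
      · exact (this).mp h2
    rw [pv_mem_pvSubstrSet] at hmem
    obtain ⟨n, hn, i, hi, hsl⟩ := hmem
    rw [PySem.List.mem_pyRange_one] at hi
    have hn0 : (0 : Int) ≤ n := by
      rw [PySem.Set.mem_ofList] at hn
      obtain ⟨w, _, hw⟩ := List.mem_map.mp hn
      rw [← hw, PySem.Str.len_eq]; positivity
    have := pv_slice_isIn text n i hi.1 hn0
    rw [hsl, hb] at this
    exact Bool.false_ne_true this
  · apply (PySem.Set.contains_iff _ _).mpr
    rw [pv_mem_pvSubstrSet]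
    obtain ⟨i, hi, hsl⟩ := (pv_isIn_iff_slice text k).mp hb
    refine ⟨PySem.Str.len k, ?_, i, hi, hsl⟩
    rw [PySem.Set.mem_ofList]
    exact List.mem_map.mpr ⟨k, hk, rfl⟩

-- A's loop: the seen-set is exactly the matched list, which is the pred-filter of the running dedup set
theorem pv_loopA (pred : String → Bool) : ∀ (l : List String) (s : List String),
    l.foldl
      (fun (acc : List String × PySem.Set String) keyword =>
        if PySem.Set.contains acc.2 keyword then acc
        else if pred keyword then (acc.1 ++ [keyword], PySem.Set.add acc.2 keyword)
        else acc)
      (s.filter pred, s.filter pred)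
    = ((l.foldl PySem.Set.add s).filter pred, (l.foldl PySem.Set.add s).filter pred) := by
  intro l
  induction l with
  | nil => intro s; simp
  | cons kw l ih =>
    intro s
    rw [List.foldl_cons, List.foldl_cons]
    by_cases hc : PySem.Set.contains (s.filter pred) kw = true
    · have hmem := List.mem_filter.mp ((PySem.Set.contains_iff _ kw).mp hc)
      have hadd : PySem.Set.add s kw = s := by simp [PySem.Set.add, hmem.1]
      rw [if_pos hc, hadd]
      exact ih s
    · have hnm : ¬ (kw ∈ s ∧ pred kw = true) := fun h =>
        hc ((PySem.Set.contains_iff _ kw).mpr (List.mem_filter.mpr ⟨h.1, h.2⟩))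
      rw [if_neg hc]
      by_cases hp : pred kw = true
      · have hks : kw ∉ s := fun h => hnm ⟨h, hp⟩
        have hadd : PySem.Set.add s kw = s ++ [kw] := by simp [PySem.Set.add, hks]
        have hfil : (s ++ [kw]).filter pred = s.filter pred ++ [kw] := by
          rw [List.filter_append]; simp [hp]
        have hkm : kw ∉ s.filter pred := fun h => hc ((PySem.Set.contains_iff _ kw).mpr h)
        have haddm : PySem.Set.add (s.filter pred) kw = s.filter pred ++ [kw] := by
          simp [PySem.Set.add, hkm]
        rw [if_pos hp, hadd, haddm, ← hfil]
        exact ih (s ++ [kw])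
      · have hfil : (PySem.Set.add s kw).filter pred = s.filter pred := by
          by_cases hks : kw ∈ s
          · simp [PySem.Set.add, hks]
          · have hadd : PySem.Set.add s kw = s ++ [kw] := by simp [PySem.Set.add, hks]
            rw [hadd, List.filter_append]
            simp [hp]
        rw [if_neg hp, ← hfil]
        exact ih (PySem.Set.add s kw)

-- ===== VERDICT (by name: the statement is the Claim_ definition above) =====
theorem find_matched_keywords_spec : Claim_equal_find_matched_keywords := by
  intro text keywords _
  unfold Spec_find_matched_keywords
  -- A's side
  unfold find_matched_keywords
  have hA := pv_loopA (fun k => PySem.Str.isIn k text) keywords []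
  simp only [] at hA
  simp only [List.filter_nil] at hA
  rw [show (PySem.Set.empty : PySem.Set String) = ([] : List String) from rfl]
  rw [hA]
  -- B's side
  unfold find_matched_keywords_alt
  rw [PySem.List.foldl_append_if
        (fun k => PySem.Set.contains (pvSubstrSet text (PySem.Set.ofList (keywords.map PySem.Str.len))) k)
        (fun k => k) (PySem.List.dedup keywords) []]
  simp only [List.map_id_fun', id_eq, List.nil_append]
  rw [PySem.List.dedup_eq_ofList, PySem.Set.ofList_eq_foldl]
  apply List.filter_congr
  intro k hk
  have hkk : k ∈ keywords := by
    rw [← PySem.Set.ofList_eq_foldl] at hk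
    exact (PySem.Set.mem_ofList _ _).mp hk
  exact (pv_pred_eq text keywords k hkk).symm
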